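-- pv_equiv track=rewrite | github.com/KrashKart/python-problems | indiv_solutions/037-collapse_intervals.py | collapse_intervals
-- ===== SOURCE A (Python) =====
-- def collapse_intervals(items):
--     if not items or len(items) == 1:
--         return "" if not items else items[0]
--     tally = []
--     start = items[0]
--     for i in range(1, len(items) + 1):
--         if i == len(items) or items[i] != items[i - 1] + 1:
--             tally.append(str(start) if start == items[i - 1] else f"{start}-{items[i - 1]}")
--             if i != len(items):
--                 start = items[i]
--
--     return ",".join(tally)
-- ===== SOURCE B (Python) =====
-- def collapse_intervals(items):
--     if not items:
--         return ""
--     if len(items) == 1: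
--         return items[0]
--     n = len(items)
--     # stage 1: the cut positions -- indices where a new run begins, plus both ends
--     cuts = [0] + [i for i in range(1, n) if items[i] != items[i - 1] + 1] + [n]
--     # stage 2: each adjacent cut pair (a, b) delimits the run items[a:b]
--     parts = []
--     for a, b in zip(cuts, cuts[1:]):
--         lo, hi = items[a], items[b - 1]
--         parts.append(str(lo) if lo == hi else f"{lo}-{hi}")
--     return ",".join(parts)
-- ===== Notes on version B (the rewrite author's own statement) =====
-- stated objective: alternative
-- what changed: B keeps no run state at all: it first computes the list of break indices (where items[i] != items[i-1]+1) by a comprehension, brackets it with 0 and n, and then formats each adjacent cut pair (a,b) from the endpoints items[a], items[b-1], replacing A's single stateful loop that tracks a running start and emits inline with an i==len sentinel.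
-- outside the precondition, e.g. on collapse_intervals([5]): A returns 5, B returns 5; on collapse_intervals([0]): A returns 0, B returns 0
import Mathlib
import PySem

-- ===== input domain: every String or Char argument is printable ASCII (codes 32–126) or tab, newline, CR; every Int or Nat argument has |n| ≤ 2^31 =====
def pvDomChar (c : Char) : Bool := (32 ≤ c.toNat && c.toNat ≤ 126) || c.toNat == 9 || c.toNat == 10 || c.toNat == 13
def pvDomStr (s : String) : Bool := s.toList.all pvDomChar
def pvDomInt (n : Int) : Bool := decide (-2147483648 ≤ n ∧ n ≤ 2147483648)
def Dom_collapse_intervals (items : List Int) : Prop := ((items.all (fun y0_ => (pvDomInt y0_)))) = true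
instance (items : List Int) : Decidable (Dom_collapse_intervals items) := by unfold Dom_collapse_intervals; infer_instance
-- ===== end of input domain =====

-- B keeps no run state: it computes the break-index list by a comprehension, brackets it with
-- 0 and n, and formats each adjacent cut pair from the slice endpoints (alternative decomposition).

-- ===== PORT A =====
-- loop body of A's for-loop (kept as a named helper; it is A's body verbatim)
def pvStepA (items : List Int) (n : Int) (st : List String × Int) (i : Int) : List String × Int :=
  if i = n ∨ PySem.List.pyGetD items i 0 ≠ PySem.List.pyGetD items (i - 1) 0 + 1 then
    let tally := st.1 ++ [if st.2 = PySem.List.pyGetD items (i - 1) 0 then PySem.Int.toStr st.2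
                          else PySem.Int.toStr st.2 ++ "-" ++ PySem.Int.toStr (PySem.List.pyGetD items (i - 1) 0)]
    if i ≠ n then (tally, PySem.List.pyGetD items i 0) else (tally, st.2)
  else st

-- on a single-element list Python A returns the raw int items[0] (not a string); that input is
-- outside Pre_ below, and the port renders it with toStr only to stay total
def collapse_intervals (items : List Int) : String :=
  if items = [] ∨ items.length = 1 then
    (if items = [] then "" else PySem.Int.toStr (PySem.List.pyGetD items 0 0))
  else
    PySem.Str.join ","
      (((PySem.List.pyRange 1 ((items.length : Int) + 1) 1).foldl
          (pvStepA items (items.length : Int)) ([], PySem.List.pyGetD items 0 0)).1)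

-- ===== PORT B =====
-- the comprehension's filter condition: index i starts a new run
def pvBrk (items : List Int) (i : Int) : Bool :=
  PySem.List.pyGetD items i 0 != PySem.List.pyGetD items (i - 1) 0 + 1

-- the per-pair formatting of B's second loop
def pvFmtIdx (items : List Int) (ab : Int × Int) : String :=
  let lo := PySem.List.pyGetD items ab.1 0
  let hi := PySem.List.pyGetD items (ab.2 - 1) 0
  if lo = hi then PySem.Int.toStr lo else PySem.Int.toStr lo ++ "-" ++ PySem.Int.toStr hi

-- on a single-element list Python B likewise returns the raw int (outside Pre_); rendered with toStr
def collapse_intervals_alt (items : List Int) : String :=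
  if items = [] then ""
  else if items.length = 1 then PySem.Int.toStr (PySem.List.pyGetD items 0 0)
  else
    let n : Int := (items.length : Int)
    let cuts : List Int :=
      0 :: ((PySem.List.pyRange 1 n 1).filter (pvBrk items) ++ [n])
    PySem.Str.join "," ((cuts.zip cuts.tail).map (pvFmtIdx items))

-- ===== PRECONDITION & SPEC =====
-- Pre_ excludes single-element lists: there Python A returns the raw int items[0], not a string
-- (no value of the declared return type String); B does the same, so neither is portable there.
def Pre_collapse_intervals (items : List Int) : Prop := items.length ≠ 1
instance (items : List Int) : Decidable (Pre_collapse_intervals items) := by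
  unfold Pre_collapse_intervals; infer_instance
def pvWitness_collapse_intervals : List Int := ([1, 2, 3, 5, 7, 8])
def Spec_collapse_intervals (items : List Int) (out : String) : Prop := out = collapse_intervals_alt items
instance (items : List Int) (out : String) : Decidable (Spec_collapse_intervals items out) := by unfold Spec_collapse_intervals; infer_instance

-- ===== CLAIM (what is proved, stated in full; the proofs are below) =====
def Claim_equal_collapse_intervals : Prop := ∀ (items : List Int), Dom_collapse_intervals items → Pre_collapse_intervals items → Spec_collapse_intervals items (collapse_intervals items)

-- ===== LEMMAS AND PROOFS =====

-- proof-side intermediate: the maximal consecutive runs as closed (start, end) pairs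
def pvFmt (r : Int × Int) : String :=
  if r.1 = r.2 then PySem.Int.toStr r.1 else PySem.Int.toStr r.1 ++ "-" ++ PySem.Int.toStr r.2

def pvRuns (start prev : Int) : List Int → List (Int × Int)
  | [] => [(start, prev)]
  | x :: rest => if x ≠ prev + 1 then (start, prev) :: pvRuns x x rest else pvRuns start x rest

-- A's fold computes the formatted runs
theorem pv_key (items : List Int) :
    ∀ (rest : List Int) (j : Nat), 1 ≤ j → items.drop j = rest →
      j + rest.length = items.length →
      ∀ (tally : List String) (start : Int),
      ((PySem.List.pyRange (j : Int) ((items.length : Int) + 1) 1).foldl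
          (pvStepA items (items.length : Int)) (tally, start)).1
        = tally ++ (pvRuns start (items.getD (j - 1) 0) rest).map pvFmt := by
  intro rest
  induction rest with
  | nil =>
      intro j hj hdrop hlen tally start
      have hjn : j = items.length := by simpa using hlen
      subst hjn
      have hprev : PySem.List.pyGetD items ((items.length : Int) - 1) 0
          = items.getD (items.length - 1) 0 := by
        have h1 : 1 ≤ items.length := by omega
        have hc : ((items.length : Int) - 1) = ((items.length - 1 : Nat) : Int) := by
          omega
        rw [hc, PySem.List.pyGetD_natCast]
      rw [PySem.List.pyRange_one_cons (by omega), PySem.List.pyRange_one_eq_nil (by omega)]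
      simp [pvStepA, pvRuns, pvFmt, hprev]
  | cons x rest' ih =>
      intro j hj hdrop hlen tally start
      have hjlt : j < items.length := by
        have := hlen; simp at this; omega
      have hx : items.getD j 0 = x := by
        have h1 : items[j + 0]? = some x := by
          rw [← List.getElem?_drop, hdrop]; rfl
        simp at h1
        simp [List.getD_eq_getElem?_getD, h1]
      have hdrop' : items.drop (j + 1) = rest' := by
        have := congrArg List.tail hdrop
        simpa [List.tail_drop] using this
      rw [PySem.List.pyRange_one_cons (by omega)]
      simp only [List.foldl_cons]
      have hgetj : PySem.List.pyGetD items (j : Int) 0 = x := by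
        rw [PySem.List.pyGetD_natCast, hx]
      have hgetp : PySem.List.pyGetD items ((j : Int) - 1) 0 = items.getD (j - 1) 0 := by
        have hc : ((j : Int) - 1) = ((j - 1 : Nat) : Int) := by omega
        rw [hc, PySem.List.pyGetD_natCast]
      have hne : (j : Int) ≠ (items.length : Int) := by
        intro h; omega
      have hcast : ((j : Int) + 1) = ((j + 1 : Nat) : Int) := by push_cast; ring
      by_cases hc : x = items.getD (j - 1) 0 + 1
      · -- consecutive value: A leaves its state unchanged
        have hcond : ¬ ((j : Int) = (items.length : Int) ∨
            PySem.List.pyGetD items (j : Int) 0 ≠ PySem.List.pyGetD items ((j : Int) - 1) 0 + 1) := by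
          exact not_or.mpr ⟨hne, not_not_intro (by rw [hgetj, hgetp, hc])⟩
        rw [show pvStepA items (items.length : Int) (tally, start) (j : Int) = (tally, start) by
          simp only [pvStepA]; rw [if_neg hcond]]
        rw [hcast, ih (j + 1) (by omega) hdrop' (by simp at hlen ⊢; omega) tally start]
        have hx' : items.getD (j + 1 - 1) 0 = x := by simpa using hx
        rw [hx', show pvRuns start (items.getD (j - 1) 0) (x :: rest') = pvRuns start x rest' by
          simp [pvRuns, hc]]
      · -- break: A emits the closed run inline
        have hcond : ((j : Int) = (items.length : Int) ∨
            PySem.List.pyGetD items (j : Int) 0 ≠ PySem.List.pyGetD items ((j : Int) - 1) 0 + 1) := by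
          right; rw [hgetj, hgetp]; exact hc
        rw [show pvStepA items (items.length : Int) (tally, start) (j : Int)
            = (tally ++ [pvFmt (start, items.getD (j - 1) 0)], x) by
          simp only [pvStepA]; rw [if_pos hcond, if_pos hne, hgetj]
          simp [pvFmt, hgetp]]
        rw [hcast, ih (j + 1) (by omega) hdrop' (by simp at hlen ⊢; omega)
            (tally ++ [pvFmt (start, items.getD (j - 1) 0)]) x]
        have hx' : items.getD (j + 1 - 1) 0 = x := by simpa using hx
        rw [hx']
        have hrun : pvRuns start (items.getD (j - 1) 0) (x :: rest')
            = (start, items.getD (j - 1) 0) :: pvRuns x x rest' := by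
          simp only [pvRuns]; rw [if_pos hc]
        rw [hrun]
        simp

-- B's cut pairs, formatted, are the formatted runs
theorem pv_cuts (items : List Int) :
    ∀ (rest : List Int) (j a : Nat), 1 ≤ j → a < j → items.drop j = rest →
      j + rest.length = items.length →
      (let T := (PySem.List.pyRange (j : Int) ((items.length : Int)) 1).filter (pvBrk items)
          ++ [((items.length : Int))]
       (((a : Int) :: T).zip T).map (pvFmtIdx items))
        = (pvRuns (items.getD a 0) (items.getD (j - 1) 0) rest).map pvFmt := by
  intro rest
  induction rest with
  | nil =>
      intro j a hj ha hdrop hlen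
      have hjn : j = items.length := by simpa using hlen
      subst hjn
      have hn1 : 1 ≤ items.length := by omega
      have hga : PySem.List.pyGetD items (a : Int) 0 = items.getD a 0 :=
        PySem.List.pyGetD_natCast ..
      have hgp : PySem.List.pyGetD items ((items.length : Int) - 1) 0
          = items.getD (items.length - 1) 0 := by
        have hc : ((items.length : Int) - 1) = ((items.length - 1 : Nat) : Int) := by omega
        rw [hc, PySem.List.pyGetD_natCast]
      rw [PySem.List.pyRange_one_eq_nil (by omega)]
      simp [List.zip, pvFmtIdx, pvRuns, pvFmt, hga, hgp]
  | cons x rest' ih =>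
      intro j a hj ha hdrop hlen
      have hjlt : j < items.length := by have := hlen; simp at this; omega
      have hx : items.getD j 0 = x := by
        have h1 : items[j + 0]? = some x := by
          rw [← List.getElem?_drop, hdrop]; rfl
        simp at h1
        simp [List.getD_eq_getElem?_getD, h1]
      have hdrop' : items.drop (j + 1) = rest' := by
        have := congrArg List.tail hdrop
        simpa [List.tail_drop] using this
      have hgetj : PySem.List.pyGetD items (j : Int) 0 = x := by
        rw [PySem.List.pyGetD_natCast, hx]
      have hgetp : PySem.List.pyGetD items ((j : Int) - 1) 0 = items.getD (j - 1) 0 := by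
        have hc : ((j : Int) - 1) = ((j - 1 : Nat) : Int) := by omega
        rw [hc, PySem.List.pyGetD_natCast]
      have hga : PySem.List.pyGetD items (a : Int) 0 = items.getD a 0 :=
        PySem.List.pyGetD_natCast ..
      have hcast : ((j : Int) + 1) = ((j + 1 : Nat) : Int) := by push_cast; ring
      rw [PySem.List.pyRange_one_cons (by omega)]
      simp only [List.filter_cons]
      by_cases hc : x = items.getD (j - 1) 0 + 1
      · -- no break at j
        have hb : pvBrk items (j : Int) = false := by
          simp [pvBrk, hgetj, hgetp, hc]
        simp only [hb, Bool.false_eq_true, if_false]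
        have := ih (j + 1) a (by omega) (by omega) hdrop' (by simp at hlen ⊢; omega)
        simp only at this ⊢
        rw [hcast]
        rw [this]
        have hx' : items.getD (j + 1 - 1) 0 = x := by simpa using hx
        rw [hx', show pvRuns (items.getD a 0) (items.getD (j - 1) 0) (x :: rest')
            = pvRuns (items.getD a 0) x rest' by simp [pvRuns, hc]]
      · -- break at j
        have hb : pvBrk items (j : Int) = true := by
          simp [pvBrk, hgetj, hgetp]; exact hc
        simp only [hb, if_true]
        have := ih (j + 1) j (by omega) (by omega) hdrop' (by simp at hlen ⊢; omega)
        simp only [Nat.add_sub_cancel, hx] at this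
        have hrun : pvRuns (items.getD a 0) (items.getD (j - 1) 0) (x :: rest')
            = (items.getD a 0, items.getD (j - 1) 0) :: pvRuns x x rest' := by
          simp only [pvRuns]; rw [if_pos hc]
        rw [hcast]
        simp only [List.cons_append, List.zip_cons_cons, List.map_cons]
        rw [this, hrun, List.map_cons]
        congr 1
        simp [pvFmtIdx, pvFmt, hga, hgetp]

-- ===== VERDICT (by name: the statement is the Claim_ definition above) =====
theorem collapse_intervals_spec : Claim_equal_collapse_intervals := by
  intro items _hdom hpre
  unfold Spec_collapse_intervals
  match items with
  | [] => rfl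
  | [x] => exact absurd rfl hpre
  | x :: y :: rest =>
      unfold collapse_intervals collapse_intervals_alt
      rw [if_neg (by simp), if_neg (by simp), if_neg (by simp)]
      have hA := pv_key (x :: y :: rest) (y :: rest) 1 (by omega) (by simp) (by simp; omega) [] x
      simp only [Nat.cast_one] at hA
      have hB := pv_cuts (x :: y :: rest) (y :: rest) 1 0 (by omega) (by omega) (by simp)
        (by simp; omega)
      simp only [Nat.cast_one, Nat.cast_zero] at hB
      rw [show PySem.List.pyGetD (x :: y :: rest) 0 0 = x from
        PySem.List.pyGetD_zero_cons x (y :: rest) 0]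
      rw [hA]
      simp only [List.nil_append]
      rw [List.tail_cons, hB]
      simp [List.getD]
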